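-- pv_equiv track=rewrite | github.com/Pckk-solvers/Water-Info-Acquirer | src/hydrology_graphs/ui/app.py | _should_use_palette_row
-- ===== SOURCE A (Python) =====
-- from typing import Any, cast
--
-- def _should_use_palette_row(row_def: dict[str, Any]) -> bool:
--     """複合入力行を詳細設定ダイアログへ寄せるべきか判定する。"""
--
--     values = list(row_def.get("values") or [])
--     if not values:
--         return False
--     if any(str(value.get("kind", "")).strip() == "color" for value in values):
--         return True
--     non_bool_values = [value for value in values if str(value.get("kind", "")).strip() != "bool"]
--     if len(non_bool_values) >= 3:
--         return True
--     if len(non_bool_values) >= 2 and any(str(value.get("kind", "")).strip() == "choice" for value in non_bool_values):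
--         return True
--     return False
-- ===== SOURCE B (Python) =====
-- def _should_use_palette_row(row_def):
--     """One tally pass over values instead of three scans/filters."""
--     values = list(row_def.get("values") or [])
--     if not values:
--         return False
--     nonbool = 0
--     choice = 0
--     for value in values:
--         k = str(value.get("kind", "")).strip()
--         if k == "color":
--             return True
--         if k != "bool":
--             nonbool += 1
--         if k == "choice":
--             choice += 1
--     return nonbool >= 3 or (nonbool >= 2 and choice >= 1)
-- ===== Notes on version B (the rewrite author's own statement) =====
-- stated objective: simpler
-- what changed: Replaces the three separate passes (any-color scan, non-bool filter list, any-choice scan over the filtered list) with a single loop that returns True at the first color and otherwise tallies non-bool and choice counts, deciding from the two counters at the end.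
import Mathlib
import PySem

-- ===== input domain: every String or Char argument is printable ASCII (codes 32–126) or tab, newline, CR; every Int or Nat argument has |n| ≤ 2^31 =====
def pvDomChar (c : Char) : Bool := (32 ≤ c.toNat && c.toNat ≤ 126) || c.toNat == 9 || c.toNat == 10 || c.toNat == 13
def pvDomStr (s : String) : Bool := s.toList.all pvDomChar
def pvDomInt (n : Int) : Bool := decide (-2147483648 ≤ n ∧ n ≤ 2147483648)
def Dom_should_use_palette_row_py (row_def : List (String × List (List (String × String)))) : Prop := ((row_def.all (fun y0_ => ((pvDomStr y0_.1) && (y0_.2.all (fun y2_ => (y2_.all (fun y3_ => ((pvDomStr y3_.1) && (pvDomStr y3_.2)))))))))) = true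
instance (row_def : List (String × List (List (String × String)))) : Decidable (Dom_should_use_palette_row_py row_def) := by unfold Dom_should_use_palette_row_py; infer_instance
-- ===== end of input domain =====

-- B replaces A's three passes over `values` by one tally loop (objective: simpler).

-- str(value.get("kind", "")).strip() — dict lookup is first-match on the assoc list; strip is exact on ASCII
def pvKind (v : List (String × String)) : String :=
  PySem.Str.strip (((v.find? (fun p => p.1 == "kind")).map (·.2)).getD "")

-- row_def.get("values") or []  (a missing key and an empty list both yield [])
def pvValues (row_def : List (String × List (List (String × String)))) : List (List (String × String)) :=
  ((row_def.find? (fun p => p.1 == "values")).map (·.2)).getD []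

-- ===== PORT A =====
def should_use_palette_row_py (row_def : List (String × List (List (String × String)))) : Bool :=
  let values := pvValues row_def
  if values.isEmpty then false
  else if values.any (fun v => pvKind v == "color") then true
  else
    let non_bool_values := values.filter (fun v => pvKind v != "bool")
    if 3 ≤ non_bool_values.length then true
    else if 2 ≤ non_bool_values.length ∧ non_bool_values.any (fun v => pvKind v == "choice") then true
    else false

-- ===== PORT B =====
-- the for-loop of Source B: early return on "color", otherwise tally the two counters
def pvTally : List (List (String × String)) → Nat → Nat → Bool
  | [], nonbool, choice => decide (3 ≤ nonbool) || (decide (2 ≤ nonbool) && decide (1 ≤ choice))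
  | v :: rest, nonbool, choice =>
    let k := pvKind v
    if k == "color" then true
    else pvTally rest (if k != "bool" then nonbool + 1 else nonbool)
                      (if k == "choice" then choice + 1 else choice)

def should_use_palette_row_py_alt (row_def : List (String × List (List (String × String)))) : Bool :=
  let values := pvValues row_def
  if values.isEmpty then false
  else pvTally values 0 0

-- ===== PRECONDITION & SPEC =====
def Spec_should_use_palette_row_py (row_def : List (String × List (List (String × String)))) (out : Bool) : Prop := out = should_use_palette_row_py_alt row_def
instance (row_def : List (String × List (List (String × String)))) (out : Bool) : Decidable (Spec_should_use_palette_row_py row_def out) := by unfold Spec_should_use_palette_row_py; infer_instance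

-- ===== CLAIM (what is proved, stated in full; the proofs are below) =====
def Claim_equal_should_use_palette_row_py : Prop := ∀ (row_def : List (String × List (List (String × String)))), Dom_should_use_palette_row_py row_def → Spec_should_use_palette_row_py row_def (should_use_palette_row_py row_def)

-- ===== LEMMAS AND PROOFS =====

-- the tally loop computes: color anywhere, or the counter thresholds over the rest
theorem pvTally_eq (vs : List (List (String × String))) (nb ch : Nat) :
    pvTally vs nb ch =
      (vs.any (fun v => pvKind v == "color") ||
       (decide (3 ≤ (vs.filter (fun v => pvKind v != "bool")).length + nb) ||
        (decide (2 ≤ (vs.filter (fun v => pvKind v != "bool")).length + nb) &&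
         (vs.any (fun v => pvKind v == "choice") || decide (1 ≤ ch))))) := by
  induction vs generalizing nb ch with
  | nil => simp [pvTally]
  | cons v rest ih =>
    by_cases hc : pvKind v = "color"
    · simp [pvTally, hc]
    · by_cases hb : pvKind v = "bool"
      · have hch : pvKind v ≠ "choice" := by simp [hb]
        simp only [pvTally, List.any_cons, List.filter_cons]
        simp [hb, ih]
      · by_cases hch : pvKind v = "choice"
        · simp only [pvTally, List.any_cons, List.filter_cons, ih]
          rw [Bool.eq_iff_iff]
          cases hA : rest.any (fun v => pvKind v == "color") <;>
            cases hB : rest.any (fun v => pvKind v == "choice") <;>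
              simp [hch] <;> omega
        · simp only [pvTally, List.any_cons, List.filter_cons, ih]
          rw [Bool.eq_iff_iff]
          cases hA : rest.any (fun v => pvKind v == "color") <;>
            cases hB : rest.any (fun v => pvKind v == "choice") <;>
              simp [hc, hb, hch] <;> omega

-- any-choice over the non-bool filter equals any-choice over all values ("choice" ≠ "bool")
theorem any_choice_filter (vs : List (List (String × String))) :
    (vs.filter (fun v => pvKind v != "bool")).any (fun v => pvKind v == "choice") =
      vs.any (fun v => pvKind v == "choice") := by
  induction vs with
  | nil => rfl
  | cons v rest ih =>
    by_cases hch : pvKind v = "choice"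
    · have hnb : pvKind v ≠ "bool" := by simp [hch]
      simp [hch]
    · by_cases hb : pvKind v = "bool" <;> simp [hb, ih]

-- ===== VERDICT (by name: the statement is the Claim_ definition above) =====
theorem should_use_palette_row_py_spec : Claim_equal_should_use_palette_row_py := by
  intro row_def _
  unfold Spec_should_use_palette_row_py should_use_palette_row_py should_use_palette_row_py_alt
  cases h : pvValues row_def with
  | nil => simp
  | cons v rest =>
    simp only [List.isEmpty_cons, Bool.false_eq_true, if_false]
    rw [pvTally_eq]
    rw [← any_choice_filter (v :: rest)]
    rw [Bool.eq_iff_iff]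
    cases hA : (v :: rest).any (fun v => pvKind v == "color") <;>
      cases hB : ((v :: rest).filter (fun v => pvKind v != "bool")).any
          (fun v => pvKind v == "choice") <;>
        simp
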